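-- pv_equiv track=rewrite | github.com/adamdinet/Closures | scripts/proximity_alert.py | get_spadoc_from_source
-- ===== SOURCE A (Python) =====
-- def get_spadoc_from_source(source_text, box_score):
--     """
--     Try to match a closure source/description to a SPADOC_CD country code.
--     Checks if any country name from box_score appears in the source text.
--     Returns list of matching (SPADOC_CD, country_name) tuples.
--     """
--     source_upper = source_text.upper()
--     matches = []
--     for spadoc, row in box_score.items():
--         country = row.get('COUNTRY', '').upper()
--         if country and len(country) > 3 and country in source_upper:
--             matches.append((spadoc, row.get('COUNTRY', '')))
--     return matches
-- ===== SOURCE B (Python) =====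
-- def get_spadoc_from_source(source_text, box_score):
--     """Same result as A, but each distinct country name is searched for in the
--     source text at most once: dedup into a set, match once, then filter rows
--     by membership in the found-set."""
--     src = source_text.upper()
--     candidates = {row.get('COUNTRY', '').upper() for row in box_score.values()}
--     found = {c for c in candidates if len(c) > 3 and c in src}
--     return [(spadoc, row.get('COUNTRY', ''))
--             for spadoc, row in box_score.items()
--             if row.get('COUNTRY', '').upper() in found]
-- ===== Notes on version B (the rewrite author's own statement) =====
-- stated objective: alternative
-- what changed: Instead of substring-searching the source once per row, B dedups the country names into a set, searches each distinct name in the source once to build a found-set, and then filters the rows by set membership, so duplicate country names cost one search instead of one per row.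
import Mathlib
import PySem

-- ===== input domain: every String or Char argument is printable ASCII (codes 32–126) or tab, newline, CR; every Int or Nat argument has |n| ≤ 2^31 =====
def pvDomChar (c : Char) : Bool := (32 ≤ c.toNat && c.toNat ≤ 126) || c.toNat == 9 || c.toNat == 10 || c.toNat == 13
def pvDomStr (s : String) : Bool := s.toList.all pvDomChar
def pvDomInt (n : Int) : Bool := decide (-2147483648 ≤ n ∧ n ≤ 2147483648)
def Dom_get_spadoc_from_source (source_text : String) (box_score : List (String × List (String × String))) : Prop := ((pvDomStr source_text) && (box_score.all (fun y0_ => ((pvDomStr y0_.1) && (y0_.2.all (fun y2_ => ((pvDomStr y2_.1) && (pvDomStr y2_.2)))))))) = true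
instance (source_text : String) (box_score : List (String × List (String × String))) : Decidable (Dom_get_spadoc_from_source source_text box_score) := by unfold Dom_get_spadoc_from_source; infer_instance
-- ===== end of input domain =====

-- B dedups the country names into a set so each distinct name is substring-searched once,
-- then filters the rows by membership in the found-set (objective: alternative/constant-factor).
-- ===== PORT A =====
def get_spadoc_from_source (source_text : String) (box_score : List (String × List (String × String))) : List (String × String) :=
  let source_upper := PySem.Str.upper source_text
  ((PySem.Dict.ofList box_score).items).foldl
    (fun acc p =>
      let country := PySem.Str.upper (PySem.Dict.getD (PySem.Dict.ofList p.2) "COUNTRY" "")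
      if country ≠ "" ∧ PySem.Str.len country > 3 ∧ PySem.Str.isIn country source_upper = true then
        acc ++ [(p.1, PySem.Dict.getD (PySem.Dict.ofList p.2) "COUNTRY" "")]
      else acc) []

-- ===== PORT B =====
def get_spadoc_from_source_alt (source_text : String) (box_score : List (String × List (String × String))) : List (String × String) :=
  let src := PySem.Str.upper source_text
  let d := PySem.Dict.ofList box_score
  let candidates : PySem.Set String :=
    PySem.Set.ofList (d.values.map (fun r => PySem.Str.upper (PySem.Dict.getD (PySem.Dict.ofList r) "COUNTRY" "")))
  let found : PySem.Set String :=
    candidates.filter (fun c => PySem.Str.len c > 3 && PySem.Str.isIn c src)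
  (d.items.filter
      (fun p => PySem.Set.contains found (PySem.Str.upper (PySem.Dict.getD (PySem.Dict.ofList p.2) "COUNTRY" "")))).map
    (fun p => (p.1, PySem.Dict.getD (PySem.Dict.ofList p.2) "COUNTRY" ""))

-- ===== PRECONDITION & SPEC =====
def Spec_get_spadoc_from_source (source_text : String) (box_score : List (String × List (String × String))) (out : List (String × String)) : Prop := out = get_spadoc_from_source_alt source_text box_score
instance (source_text : String) (box_score : List (String × List (String × String))) (out : List (String × String)) : Decidable (Spec_get_spadoc_from_source source_text box_score out) := by unfold Spec_get_spadoc_from_source; infer_instance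

-- ===== CLAIM (what is proved, stated in full; the proofs are below) =====
def Claim_equal_get_spadoc_from_source : Prop := ∀ (source_text : String) (box_score : List (String × List (String × String))), Dom_get_spadoc_from_source source_text box_score → Spec_get_spadoc_from_source source_text box_score (get_spadoc_from_source source_text box_score)

-- ===== LEMMAS AND PROOFS =====

-- ===== VERDICT (by name: the statement is the Claim_ definition above) =====
theorem get_spadoc_from_source_spec : Claim_equal_get_spadoc_from_source := by
  intro source_text box_score _
  unfold Spec_get_spadoc_from_source get_spadoc_from_source get_spadoc_from_source_alt
  rw [PySem.List.foldl_append_ite]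
  simp only [List.nil_append]
  rw [List.filter_congr]
  intro p hp
  have hmem : PySem.Str.upper (PySem.Dict.getD (PySem.Dict.ofList p.2) "COUNTRY" "")
      ∈ ((PySem.Dict.ofList box_score).values.map
          (fun r => PySem.Str.upper (PySem.Dict.getD (PySem.Dict.ofList r) "COUNTRY" ""))) := by
    refine List.mem_map.mpr ⟨p.2, ?_, rfl⟩
    simp only [PySem.Dict.values]
    exact List.mem_map.mpr ⟨p, hp, rfl⟩
  set c := PySem.Str.upper (PySem.Dict.getD (PySem.Dict.ofList p.2) "COUNTRY" "") with hc
  by_cases h3 : PySem.Str.len c > 3 ∧ PySem.Str.isIn c (PySem.Str.upper source_text) = true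
  · have hne : c ≠ "" := by
      intro h0
      have := h3.1
      rw [h0] at this
      simp [PySem.Str.len] at this
    have hcont : PySem.Set.contains
        ((PySem.Set.ofList ((PySem.Dict.ofList box_score).values.map
          (fun r => PySem.Str.upper (PySem.Dict.getD (PySem.Dict.ofList r) "COUNTRY" "")))).filter
          (fun c => PySem.Str.len c > 3 && PySem.Str.isIn c (PySem.Str.upper source_text))) c = true := by
      simp only [PySem.Set.contains_eq_listContains, List.contains_iff_mem, List.mem_filter,
        PySem.Set.mem_ofList]
      exact ⟨hmem, by simpa using h3⟩
    simp only [hcont, hne, h3.1, h3.2, ne_eq, not_false_iff, and_self, decide_true]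
  · have hcont : PySem.Set.contains
        ((PySem.Set.ofList ((PySem.Dict.ofList box_score).values.map
          (fun r => PySem.Str.upper (PySem.Dict.getD (PySem.Dict.ofList r) "COUNTRY" "")))).filter
          (fun c => PySem.Str.len c > 3 && PySem.Str.isIn c (PySem.Str.upper source_text))) c = false := by
      have hnot : c ∉ ((PySem.Set.ofList ((PySem.Dict.ofList box_score).values.map
          (fun r => PySem.Str.upper (PySem.Dict.getD (PySem.Dict.ofList r) "COUNTRY" "")))).filter
          (fun c => PySem.Str.len c > 3 && PySem.Str.isIn c (PySem.Str.upper source_text))) := by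
        intro hx
        obtain ⟨-, hcond⟩ := List.mem_filter.mp hx
        exact h3 (by simpa using hcond)
      simpa [PySem.Set.contains_eq_listContains] using hnot
    rw [hcont]
    simp only [decide_eq_false_iff_not, not_and]
    intro _ h4 hIn
    exact h3 ⟨h4, hIn⟩
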